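-- pv_equiv track=rewrite | github.com/Aaraujo-dev/Learning-Python-IMPA | lista3/lista3.py | get_vogals
-- ===== SOURCE A (Python) =====
-- def get_vogals(palavra):
--     vogais = "aeiou"
--     get = []
--     for vogal in vogais:
--         for letter in palavra:
--             if vogal == letter and vogal not in get:
--                 get += vogal
--     return "[" + ",".join(get) + "]"
-- ===== SOURCE B (Python) =====
-- def get_vogals(palavra):
--     mask = 0
--     for ch in palavra:
--         i = "aeiou".find(ch)
--         if i >= 0:
--             mask |= 1 << i
--     out = ["aeiou"[i] for i in range(5) if mask >> i & 1]
--     return "[" + ",".join(out) + "]"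
-- ===== Notes on version B (the rewrite author's own statement) =====
-- stated objective: alternative
-- what changed: B makes a single pass over the word accumulating a 5-bit presence bitmask ('aeiou'.find + bit-OR) and then decodes the mask into the ordered vowel list, instead of A's five full scans of the word each guarded by a membership test on the growing result list.
import Mathlib
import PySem

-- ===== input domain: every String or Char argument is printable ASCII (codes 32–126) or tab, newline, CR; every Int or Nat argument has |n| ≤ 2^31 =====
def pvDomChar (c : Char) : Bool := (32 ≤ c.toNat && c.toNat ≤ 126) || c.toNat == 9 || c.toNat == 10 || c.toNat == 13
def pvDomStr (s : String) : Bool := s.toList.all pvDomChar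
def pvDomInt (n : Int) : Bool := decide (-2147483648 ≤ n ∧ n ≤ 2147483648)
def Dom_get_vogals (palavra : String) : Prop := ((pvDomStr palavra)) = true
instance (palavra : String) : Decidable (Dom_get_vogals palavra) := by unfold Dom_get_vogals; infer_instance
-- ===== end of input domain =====

-- B makes ONE pass over the word accumulating a 5-bit presence mask, then decodes the mask
-- into the bracketed vowel list; A scans the whole word once per vowel (objective: alternative).

-- ===== PORT A =====
-- A's get is a list of single-character strings; ported as List Char (exact, every element is one char),
-- with "[" + ",".join(get) + "]" ported via PySem.Chars.join on the code points.
def get_vogals (palavra : String) : String :=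
  let get :=
    ("aeiou".toList).foldl (fun g vogal =>
      (palavra.toList).foldl (fun g letter =>
        if vogal == letter && !(g.contains vogal) then g ++ [vogal] else g) g) []
  String.mk ('[' :: PySem.Chars.join [','] (get.map (fun c => [c])) ++ [']'])

-- ===== PORT B =====
-- one fold step of B: i = "aeiou".find(ch); if i >= 0: mask |= 1 << i
def pvStep (m : Nat) (ch : Char) : Nat :=
  let i := PySem.Chars.find "aeiou".toList [ch]
  if 0 ≤ i then m ||| (1 <<< i.toNat) else m

def get_vogals_alt (palavra : String) : String :=
  let mask := palavra.toList.foldl pvStep 0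
  let out := ((PySem.List.pyRange 0 5 1).filter (fun i => (mask >>> i.toNat) &&& 1 != 0)).map
      (fun i => ("aeiou".toList)[i.toNat]!)
  String.mk ('[' :: PySem.Chars.join [','] (out.map (fun c => [c])) ++ [']'])

-- ===== PRECONDITION & SPEC =====
def Spec_get_vogals (palavra : String) (out : String) : Prop := out = get_vogals_alt palavra
instance (palavra : String) (out : String) : Decidable (Spec_get_vogals palavra out) := by unfold Spec_get_vogals; infer_instance

-- ===== CLAIM (what is proved, stated in full; the proofs are below) =====
def Claim_equal_get_vogals : Prop := ∀ (palavra : String), Dom_get_vogals palavra → Spec_get_vogals palavra (get_vogals palavra)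

-- ===== LEMMAS AND PROOFS =====

-- A's inner loop over the word either appends the vowel once (if present and not yet collected) or leaves the state alone.
theorem pv_inner_eq (v : Char) (cs : List Char) (g : List Char) :
    cs.foldl (fun g letter => if v == letter && !(g.contains v) then g ++ [v] else g) g
      = if v ∈ cs ∧ v ∉ g then g ++ [v] else g := by
  induction cs generalizing g with
  | nil => simp
  | cons l cs ih =>
    rw [List.foldl_cons]
    by_cases hvl : v = l
    · subst hvl
      by_cases hvg : v ∈ g
      · rw [if_neg (by simp [hvg]), ih]
        simp [hvg]
      · rw [if_pos (by simp [hvg]), ih]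
        simp [hvg]
    · rw [if_neg (by simp [hvl]), ih]
      by_cases hvg : v ∈ g <;> simp [hvl, hvg]

-- A's outer loop over distinct vowels (all outside the accumulator) collects exactly the present vowels, in vowel order.
theorem pv_outer_eq (cs : List Char) (vs : List Char) (g : List Char)
    (hnd : vs.Nodup) (hdis : ∀ x ∈ vs, x ∉ g) :
    vs.foldl (fun g vogal =>
        cs.foldl (fun g letter => if vogal == letter && !(g.contains vogal) then g ++ [vogal] else g) g) g
      = g ++ vs.filter (fun v => decide (v ∈ cs)) := by
  induction vs generalizing g with
  | nil => simp
  | cons v vs ih =>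
    rw [List.foldl_cons]
    have hvg : v ∉ g := hdis v (List.mem_cons_self ..)
    rw [List.nodup_cons] at hnd
    by_cases hvc : v ∈ cs
    · rw [pv_inner_eq, if_pos ⟨hvc, hvg⟩, ih (g ++ [v]) hnd.2 ?hd]
      · simp [hvc]
      case hd =>
        intro x hx
        simp only [List.mem_append, List.mem_singleton]
        rintro (h | rfl)
        · exact hdis x (List.mem_cons_of_mem _ hx) h
        · exact hnd.1 hx
    · rw [pv_inner_eq, if_neg (by tauto),
        ih g hnd.2 (fun x hx => hdis x (List.mem_cons_of_mem _ hx))]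
      simp [hvc]

-- closed form of B's mask: the OR of the presence bits of the five vowels
def pvMaskOf (cs : List Char) : Nat :=
  (if 'a' ∈ cs then 1 else 0) ||| (if 'e' ∈ cs then 2 else 0) ||| (if 'i' ∈ cs then 4 else 0)
    ||| (if 'o' ∈ cs then 8 else 0) ||| (if 'u' ∈ cs then 16 else 0)

theorem pvStep_eq (m : Nat) (ch : Char) :
    pvStep m ch = if ch = 'a' then m ||| 1 else if ch = 'e' then m ||| 2
      else if ch = 'i' then m ||| 4 else if ch = 'o' then m ||| 8
      else if ch = 'u' then m ||| 16 else m := by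
  by_cases h1 : ch = 'a'
  · subst h1
    have hf : PySem.Chars.find "aeiou".toList ['a'] = 0 := by decide
    simp only [pvStep, hf]
    norm_num [Nat.shiftLeft_eq, show Int.toNat 2 = 2 from rfl, show Int.toNat 3 = 3 from rfl, show Int.toNat 4 = 4 from rfl]
  by_cases h2 : ch = 'e'
  · subst h2
    have hf : PySem.Chars.find "aeiou".toList ['e'] = 1 := by decide
    simp only [pvStep, hf]
    norm_num [Nat.shiftLeft_eq, show Int.toNat 2 = 2 from rfl, show Int.toNat 3 = 3 from rfl, show Int.toNat 4 = 4 from rfl, h1]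
  by_cases h3 : ch = 'i'
  · subst h3
    have hf : PySem.Chars.find "aeiou".toList ['i'] = 2 := by decide
    simp only [pvStep, hf]
    norm_num [Nat.shiftLeft_eq, show Int.toNat 2 = 2 from rfl, show Int.toNat 3 = 3 from rfl, show Int.toNat 4 = 4 from rfl, h1, h2]
  by_cases h4 : ch = 'o'
  · subst h4
    have hf : PySem.Chars.find "aeiou".toList ['o'] = 3 := by decide
    simp only [pvStep, hf]
    norm_num [Nat.shiftLeft_eq, show Int.toNat 2 = 2 from rfl, show Int.toNat 3 = 3 from rfl, show Int.toNat 4 = 4 from rfl, h1, h2, h3]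
  by_cases h5 : ch = 'u'
  · subst h5
    have hf : PySem.Chars.find "aeiou".toList ['u'] = 4 := by decide
    simp only [pvStep, hf]
    norm_num [Nat.shiftLeft_eq, show Int.toNat 2 = 2 from rfl, show Int.toNat 3 = 3 from rfl, show Int.toNat 4 = 4 from rfl, h1, h2, h3, h4]
  have hfind : PySem.Chars.find "aeiou".toList [ch] = -1 := by
    rw [PySem.Chars.find_eq_neg_one_iff]
    intro hinf
    have hm : ch ∈ "aeiou".toList := hinf.subset (List.mem_singleton.2 rfl)
    have : ch = 'a' ∨ ch = 'e' ∨ ch = 'i' ∨ ch = 'o' ∨ ch = 'u' := by simpa using hm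
    tauto
  simp only [pvStep, hfind]
  norm_num [h1, h2, h3, h4, h5]

theorem pv_mask_eq (cs : List Char) (m : Nat) :
    cs.foldl pvStep m = m ||| pvMaskOf cs := by
  induction cs generalizing m with
  | nil => simp [pvMaskOf]
  | cons ch cs ih =>
    rw [List.foldl_cons, ih, pvStep_eq]
    split_ifs <;>
      by_cases h1 : 'a' ∈ cs <;> by_cases h2 : 'e' ∈ cs <;> by_cases h3 : 'i' ∈ cs <;>
        by_cases h4 : 'o' ∈ cs <;> by_cases h5 : 'u' ∈ cs <;>
      simp_all [pvMaskOf, List.mem_cons, Nat.or_assoc, @eq_comm Char 'a' ch,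
        @eq_comm Char 'e' ch, @eq_comm Char 'i' ch, @eq_comm Char 'o' ch, @eq_comm Char 'u' ch]

-- ===== VERDICT (by name: the statement is the Claim_ definition above) =====
theorem get_vogals_spec : Claim_equal_get_vogals := by
  intro palavra _
  show _ = _
  unfold get_vogals get_vogals_alt
  rw [pv_outer_eq _ _ _ (by decide) (by simp), pv_mask_eq]
  by_cases h1 : 'a' ∈ palavra.toList <;> by_cases h2 : 'e' ∈ palavra.toList <;>
    by_cases h3 : 'i' ∈ palavra.toList <;> by_cases h4 : 'o' ∈ palavra.toList <;>
    by_cases h5 : 'u' ∈ palavra.toList <;>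
    simp [pvMaskOf, h1, h2, h3, h4, h5] <;> decide
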